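-- pv_equiv track=rewrite | github.com/betterzian/PrivacyGuard | privacyguard/infrastructure/persona/json_persona_repository.py | _name_component_hint
-- ===== SOURCE A (Python) =====
-- def _name_component_hint(metadata: dict[str, list[str]] | None) -> str | None:
--     if not metadata:
--         return None
--     values = metadata.get("name_component", [])
--     if not values:
--         return None
--     normalized = [str(value).strip().lower() for value in values if str(value).strip()]
--     for preferred in ("family", "given", "middle", "full"):
--         if preferred in normalized:
--             return preferred
--     return normalized[0] if normalized else None
-- ===== SOURCE B (Python) =====
-- def _name_component_hint(metadata):
--     if not metadata:
--         return None
--     values = metadata.get("name_component", [])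
--     if not values:
--         return None
--     normalized = [str(value).strip().lower() for value in values if str(value).strip()]
--     if not normalized:
--         return None
--     rank = {"family": 0, "given": 1, "middle": 2, "full": 3}
--     best = None  # (rank, name) with the smallest rank seen so far
--     for name in normalized:
--         r = rank.get(name)
--         if r is not None and (best is None or r < best[0]):
--             best = (r, name)
--     return best[1] if best is not None else normalized[0]
-- ===== Notes on version B (the rewrite author's own statement) =====
-- stated objective: alternative
-- what changed: Instead of looping over the fixed priority tuple with a membership test on the data per priority, B scans the normalized data list once, keeping the element of smallest rank under a prebuilt priority-rank dict.
import Mathlib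
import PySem

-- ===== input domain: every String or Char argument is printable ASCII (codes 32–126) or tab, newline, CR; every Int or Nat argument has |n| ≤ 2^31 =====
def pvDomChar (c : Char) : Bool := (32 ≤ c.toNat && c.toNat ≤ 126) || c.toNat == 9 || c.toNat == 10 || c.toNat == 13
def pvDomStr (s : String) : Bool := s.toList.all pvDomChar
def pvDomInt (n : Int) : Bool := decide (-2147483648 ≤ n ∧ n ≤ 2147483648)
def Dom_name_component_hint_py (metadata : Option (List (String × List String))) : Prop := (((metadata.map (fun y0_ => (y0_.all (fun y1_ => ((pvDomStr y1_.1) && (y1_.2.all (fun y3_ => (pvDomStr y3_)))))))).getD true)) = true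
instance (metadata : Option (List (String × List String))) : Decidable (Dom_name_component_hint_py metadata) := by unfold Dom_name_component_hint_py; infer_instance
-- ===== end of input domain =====

-- B replaces A's loop over the fixed priority tuple (membership test per priority)
-- by a single pass over the normalized data keeping the smallest-rank element (objective: alternative).

-- ===== PORT A =====
def name_component_hint_py (metadata : Option (List (String × List String))) : Option String :=
  match metadata with
  | none => none
  | some md =>
    if md = [] then none
    else
      let values := (PySem.Dict.mk md).getD "name_component" []
      if values = [] then none
      else
        let normalized := (values.filter (fun v => PySem.Str.strip v ≠ "")).map
          (fun v => PySem.Str.lower (PySem.Str.strip v))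
        -- for preferred in ("family","given","middle","full"): if preferred in normalized: return preferred
        match (["family", "given", "middle", "full"]).find? (fun p => normalized.contains p) with
        | some p => some p
        | none =>
          -- return normalized[0] if normalized else None
          match normalized with
          | [] => none
          | x :: _ => some x

-- ===== PORT B =====
-- rank = {"family": 0, "given": 1, "middle": 2, "full": 3}; r = rank.get(name)
def nchRank (s : String) : Option Nat :=
  (PySem.Dict.mk [("family", 0), ("given", 1), ("middle", 2), ("full", 3)]).get? s

-- loop body: if r is not None and (best is None or r < best[0]): best = (r, name)
def nchStep (best : Option (Nat × String)) (name : String) : Option (Nat × String) :=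
  match nchRank name with
  | none => best
  | some r =>
    match best with
    | none => some (r, name)
    | some (j, _) => if r < j then some (r, name) else best

def name_component_hint_py_alt (metadata : Option (List (String × List String))) : Option String :=
  match metadata with
  | none => none
  | some md =>
    if md = [] then none
    else
      let values := (PySem.Dict.mk md).getD "name_component" []
      if values = [] then none
      else
        let normalized := (values.filter (fun v => PySem.Str.strip v ≠ "")).map
          (fun v => PySem.Str.lower (PySem.Str.strip v))
        match normalized with
        | [] => none
        | first :: _ =>
          match normalized.foldl nchStep none with
          | some (_, name) => some name
          | none => some first

-- ===== PRECONDITION & SPEC =====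
def Spec_name_component_hint_py (metadata : Option (List (String × List String))) (out : Option String) : Prop := out = name_component_hint_py_alt metadata
instance (metadata : Option (List (String × List String))) (out : Option String) : Decidable (Spec_name_component_hint_py metadata out) := by unfold Spec_name_component_hint_py; infer_instance

-- ===== CLAIM (what is proved, stated in full; the proofs are below) =====
def Claim_equal_name_component_hint_py : Prop := ∀ (metadata : Option (List (String × List String))), Dom_name_component_hint_py metadata → Spec_name_component_hint_py metadata (name_component_hint_py metadata)

-- ===== LEMMAS AND PROOFS =====

-- canonical name of each rank
def nchName (k : Nat) : String := if k = 0 then "family" else if k = 1 then "given" else if k = 2 then "middle" else "full"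

-- A's priority chain as "smallest rank present in l"
def nchP (l : List String) : Option Nat :=
  if l.contains "family" then some 0 else if l.contains "given" then some 1
  else if l.contains "middle" then some 2 else if l.contains "full" then some 3 else none

def optMin : Option Nat → Option Nat → Option Nat
  | none, b => b
  | a, none => a
  | some x, some y => some (min x y)

lemma optMin_none_right (a : Option Nat) : optMin a none = a := by cases a <;> rfl

lemma optMin_assoc (a b c : Option Nat) : optMin (optMin a b) c = optMin a (optMin b c) := by
  cases a <;> cases b <;> cases c <;> simp [optMin, Nat.min_assoc]

lemma nchRank_char (s : String) :
    nchRank s = if s = "family" then some 0 else if s = "given" then some 1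
      else if s = "middle" then some 2 else if s = "full" then some 3 else none := by
  simp only [nchRank, PySem.Dict.get?]
  split_ifs with h1 h2 h3 h4 <;> simp_all
  exact ⟨fun e => h1 e.symm, fun e => h2 e.symm, fun e => h3 e.symm, fun e => h4 e.symm⟩

lemma nchP_cons (s : String) (l : List String) :
    nchP (s :: l) = optMin (nchRank s) (nchP l) := by
  rw [nchRank_char]
  simp only [nchP, List.contains_cons, Bool.or_eq_true, beq_iff_eq]
  split_ifs <;> simp_all [optMin]

lemma nchStep_lift (o : Option Nat) (s : String) :
    nchStep (o.map (fun k => (k, nchName k))) s = (optMin o (nchRank s)).map (fun k => (k, nchName k)) := by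
  rcases h : nchRank s with _ | k
  · cases o <;> simp [nchStep, h, optMin]
  · have hs : s = nchName k := by
      rw [nchRank_char] at h
      split_ifs at h with g1 g2 g3 g4
      · injection h with h; subst h; simpa [nchName] using g1
      · injection h with h; subst h; simpa [nchName] using g2
      · injection h with h; subst h; simpa [nchName] using g3
      · injection h with h; subst h; simpa [nchName] using g4
    subst hs
    cases o with
    | none => simp [nchStep, h, optMin]
    | some j =>
      simp only [nchStep, h, Option.map_some, optMin]
      by_cases hlt : k < j
      · rw [if_pos hlt]
        have : min j k = k := by omega
        simp [this]
      · rw [if_neg hlt]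
        have : min j k = j := by omega
        simp [this]

lemma fold_char (l : List String) (o : Option Nat) :
    l.foldl nchStep (o.map (fun k => (k, nchName k))) = (optMin o (nchP l)).map (fun k => (k, nchName k)) := by
  induction l generalizing o with
  | nil => simp [nchP, optMin_none_right]
  | cons s t ih =>
    rw [List.foldl_cons, nchStep_lift, ih, nchP_cons, optMin_assoc]

lemma fold_char_none (l : List String) :
    l.foldl nchStep none = (nchP l).map (fun k => (k, nchName k)) := by
  have := fold_char l none
  simpa [optMin] using this

lemma tail_eq (l : List String) :
    (match (["family", "given", "middle", "full"]).find? (fun p => l.contains p) with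
      | some p => some p
      | none => match l with | [] => none | x :: _ => some x) =
    (match l with
      | [] => (none : Option String)
      | first :: _ =>
        match l.foldl nchStep none with
        | some (_, name) => some name
        | none => some first) := by
  cases l with
  | nil => simp [List.find?]
  | cons a t =>
    rw [fold_char_none]
    simp only [List.find?, nchP]
    split_ifs with h1 h2 h3 h4 <;>
      simp_all [nchName]

-- ===== VERDICT (by name: the statement is the Claim_ definition above) =====
theorem name_component_hint_py_spec : Claim_equal_name_component_hint_py := by
  intro metadata _
  unfold Spec_name_component_hint_py
  cases metadata with
  | none => rfl
  | some md =>
    simp only [name_component_hint_py, name_component_hint_py_alt]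
    by_cases hmd : md = []
    · simp [hmd]
    · simp only [if_neg hmd]
      by_cases hv : (PySem.Dict.mk md).getD "name_component" [] = []
      · simp [hv]
      · simp only [if_neg hv]
        exact tail_eq _
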